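-- pv_equiv track=rewrite | github.com/moses-smt/mosesdecoder | scripts/training/extract_words_dlm.py | cept_to_spans
-- ===== SOURCE A (Python) =====
-- def cept_to_spans(cept):
--     SPANS = []
--     for index in sorted(cept):
--         if not SPANS:
--             SPANS.append([index, index + 1])
--             continue
--         if SPANS[-1][1] == index:
--             SPANS[-1][1] = index + 1
--         else:
--             SPANS.append([index, index + 1])
--
--     return SPANS
-- ===== SOURCE B (Python) =====
-- def cept_to_spans(cept):
--     # staged passes: flag run starts, then pair run-start values with run-end values
--     s = sorted(cept)
--     flags = [True] + [b != a + 1 for a, b in zip(s, s[1:])]   # flags[i]: s[i] starts a new run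
--     starts = [v for v, f in zip(s, flags) if f]               # first value of each run
--     ends = [v for v, f in zip(s, flags[1:]) if f] + s[-1:]    # last value of each run
--     return [[lo, hi + 1] for lo, hi in zip(starts, ends)]
-- ===== Notes on version B (the rewrite author's own statement) =====
-- stated objective: alternative
-- what changed: Replaces A's stateful fold that grows/mutates the last span in place with staged whole-list passes: a boolean run-start flag list computed by zipping the sorted list with its shift, two filtered comprehensions extracting run-start and run-end values, and a final zip emitting the spans.
import Mathlib
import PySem

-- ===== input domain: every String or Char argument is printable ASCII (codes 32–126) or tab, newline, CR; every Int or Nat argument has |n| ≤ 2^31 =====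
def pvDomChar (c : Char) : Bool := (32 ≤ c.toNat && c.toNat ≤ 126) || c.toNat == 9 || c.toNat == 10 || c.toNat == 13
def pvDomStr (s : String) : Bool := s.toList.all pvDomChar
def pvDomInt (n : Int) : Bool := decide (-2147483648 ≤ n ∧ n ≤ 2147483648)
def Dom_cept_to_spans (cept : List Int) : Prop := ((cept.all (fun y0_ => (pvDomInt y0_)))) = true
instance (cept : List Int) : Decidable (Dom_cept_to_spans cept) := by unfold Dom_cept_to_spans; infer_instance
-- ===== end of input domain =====

-- B replaces A's stateful fold (mutating the last span in place) by staged whole-list passes: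
-- a boolean run-start flag list, filtered start/end value lists, and a final zip; same return value.

-- ===== PORT A =====
-- loop body of A: spans kept in reverse (append-at-end = cons on reversed list; reversed at the end)
def pvStepA (spans : List (List Int)) (index : Int) : List (List Int) :=
  match spans with
  | [] => [[index, index + 1]]                                   -- if not SPANS: append [index, index+1]
  | [lo, hi] :: rest =>
      if hi = index then [lo, index + 1] :: rest                 -- SPANS[-1][1] = index + 1
      else [index, index + 1] :: [lo, hi] :: rest                -- append new span
  | _ => [[index, index + 1]] ++ spans                           -- unreachable: spans only holds pairs

def cept_to_spans (cept : List Int) : List (List Int) :=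
  ((PySem.List.sorted cept (fun x => x) false).foldl pvStepA []).reverse

-- ===== PORT B =====
-- flags = [True] + [b != a + 1 for a, b in zip(s, s[1:])]       (s[1:] = drop 1)
def pvFlags (s : List Int) : List Bool :=
  true :: ((s.zip (s.drop 1)).map (fun p => decide (p.2 ≠ p.1 + 1)))

-- starts = [v for v, f in zip(s, flags) if f]
def pvStarts (s : List Int) : List Int :=
  ((s.zip (pvFlags s)).filter (fun p => p.2)).map (fun p => p.1)

-- ends = [v for v, f in zip(s, flags[1:]) if f] + s[-1:]        (s[-1:] = drop (len-1), exact also for empty s)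
def pvEnds (s : List Int) : List Int :=
  ((s.zip ((pvFlags s).drop 1)).filter (fun p => p.2)).map (fun p => p.1) ++ s.drop (s.length - 1)

-- return [[lo, hi + 1] for lo, hi in zip(starts, ends)]
def cept_to_spans_alt (cept : List Int) : List (List Int) :=
  let s := PySem.List.sorted cept (fun x => x) false
  ((pvStarts s).zip (pvEnds s)).map (fun p => [p.1, p.2 + 1])

-- ===== PRECONDITION & SPEC =====
def Spec_cept_to_spans (cept : List Int) (out : List (List Int)) : Prop := out = cept_to_spans_alt cept
instance (cept : List Int) (out : List (List Int)) : Decidable (Spec_cept_to_spans cept out) := by unfold Spec_cept_to_spans; infer_instance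

-- ===== CLAIM (what is proved, stated in full; the proofs are below) =====
def Claim_equal_cept_to_spans : Prop := ∀ (cept : List Int), Dom_cept_to_spans cept → Spec_cept_to_spans cept (cept_to_spans cept)

-- ===== LEMMAS AND PROOFS =====

-- take_run(last, xs): consume the strictly-consecutive +1 run, return (end of run, remainder)
def pvTakeRun (last : Int) : List Int → Int × List Int
  | [] => (last, [])
  | x :: xs => if x = last + 1 then pvTakeRun x xs else (last, x :: xs)

theorem pvTakeRun_length (last : Int) (xs : List Int) : (pvTakeRun last xs).2.length ≤ xs.length := by
  induction xs generalizing last with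
  | nil => simp [pvTakeRun]
  | cons x xs ih =>
      simp only [pvTakeRun]
      split
      · exact le_trans (ih x) (Nat.le_succ _)
      · simp

-- reference form: one span per run, recursing on the remainder
def pvSpans : List Int → List (List Int)
  | [] => []
  | x :: xs =>
      let p := pvTakeRun x xs
      [x, p.1 + 1] :: pvSpans p.2
termination_by xs => xs.length
decreasing_by
  simpa using Nat.lt_succ_of_le (pvTakeRun_length x xs)

-- recursion forms of B's comprehensions (relative to the previous value `last`)
def pvTailStarts (last : Int) : List Int → List Int
  | [] => []
  | x :: xs => if x = last + 1 then pvTailStarts x xs else x :: pvTailStarts x xs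

def pvEndsCore (last : Int) : List Int → List Int
  | [] => []
  | x :: xs => if x = last + 1 then pvEndsCore x xs else last :: pvEndsCore x xs

theorem pvTailStarts_spec (xs : List Int) : ∀ (last : Int),
    ((xs.zip (((last :: xs).zip xs).map (fun p => !decide (p.2 = p.1 + 1)))).filter
        (fun p => p.2)).map (fun p => p.1) = pvTailStarts last xs := by
  induction xs with
  | nil => intro last; simp [pvTailStarts]
  | cons x xs ih =>
      intro last
      by_cases h : x = last + 1 <;>
        simpa [pvTailStarts, h] using ih x

theorem pvEndsCore_spec (xs : List Int) : ∀ (last : Int),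
    (((last :: xs).zip (((last :: xs).zip xs).map (fun p => !decide (p.2 = p.1 + 1)))).filter
        (fun p => p.2)).map (fun p => p.1) = pvEndsCore last xs := by
  induction xs with
  | nil => intro last; simp [pvEndsCore]
  | cons x xs ih =>
      intro last
      by_cases h : x = last + 1 <;>
        simpa [pvEndsCore, h] using ih x

theorem pvStarts_cons (x : Int) (xs : List Int) :
    pvStarts (x :: xs) = x :: pvTailStarts x xs := by
  simp [pvStarts, pvFlags, pvTailStarts_spec]

theorem pvEnds_cons (x : Int) (xs : List Int) :
    pvEnds (x :: xs) = pvEndsCore x xs ++ (x :: xs).drop xs.length := by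
  simp [pvEnds, pvFlags, pvEndsCore_spec]

theorem pvTailStarts_run (xs : List Int) : ∀ (last : Int),
    pvTailStarts last xs = (match (pvTakeRun last xs).2 with
      | [] => []
      | y :: ys => y :: pvTailStarts y ys) := by
  induction xs with
  | nil => intro last; simp [pvTailStarts, pvTakeRun]
  | cons x xs ih =>
      intro last
      by_cases h : x = last + 1
      · simpa [pvTailStarts, pvTakeRun, h] using ih x
      · simp [pvTailStarts, pvTakeRun, h]

theorem pvEndsCore_run (xs : List Int) : ∀ (last : Int),
    pvEndsCore last xs ++ (last :: xs).drop xs.length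
      = (pvTakeRun last xs).1 :: (match (pvTakeRun last xs).2 with
          | [] => []
          | y :: ys => pvEndsCore y ys ++ (y :: ys).drop ys.length) := by
  induction xs with
  | nil => intro last; simp [pvEndsCore, pvTakeRun]
  | cons x xs ih =>
      intro last
      by_cases h : x = last + 1
      · simpa [pvEndsCore, pvTakeRun, h] using ih x
      · simp [pvEndsCore, pvTakeRun, h]

-- B's staged passes compute exactly the run spans
theorem pv_staged_eq_spans (n : Nat) : ∀ (s : List Int), s.length ≤ n →
    ((pvStarts s).zip (pvEnds s)).map (fun p => ([p.1, p.2 + 1] : List Int)) = pvSpans s := by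
  induction n with
  | zero =>
      intro s hs
      have : s = [] := List.length_eq_zero_iff.mp (Nat.le_zero.mp hs)
      subst this
      simp [pvStarts, pvEnds, pvFlags, pvSpans]
  | succ n ih =>
      intro s hs
      cases s with
      | nil => simp [pvStarts, pvEnds, pvFlags, pvSpans]
      | cons x xs =>
          rw [pvStarts_cons, pvEnds_cons, pvTailStarts_run, pvEndsCore_run]
          cases hrest : (pvTakeRun x xs).2 with
          | nil => simp [pvSpans, hrest]
          | cons y ys =>
              have hlen : (y :: ys).length ≤ n := by
                have := pvTakeRun_length x xs
                rw [hrest] at this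
                simpa using le_trans this (Nat.lt_succ_iff.mp (by simpa using hs))
              have := ih (y :: ys) hlen
              rw [pvStarts_cons, pvEnds_cons] at this
              simp only [List.zip_cons_cons, List.map_cons, this]
              simp [pvSpans, hrest]

-- A's fold continued with an open span [lo, last+1] on top produces, after the final reverse,
-- exactly the run spans of the remaining list.
theorem pv_fold_run (xs : List Int) : ∀ (last lo : Int) (acc : List (List Int)),
    (xs.foldl pvStepA ([lo, last + 1] :: acc)).reverse
      = acc.reverse ++ ([lo, (pvTakeRun last xs).1 + 1] :: pvSpans (pvTakeRun last xs).2) := by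
  induction xs with
  | nil => intro last lo acc; simp [pvTakeRun, pvSpans]
  | cons x xs ih =>
      intro last lo acc
      by_cases h : x = last + 1
      · rw [List.foldl_cons,
            show pvStepA ([lo, last + 1] :: acc) x = [lo, x + 1] :: acc by
              simp [pvStepA, h]]
        rw [ih x lo acc]
        simp [pvTakeRun, h]
      · rw [List.foldl_cons,
            show pvStepA ([lo, last + 1] :: acc) x = [x, x + 1] :: [lo, last + 1] :: acc by
              simp [pvStepA, show ¬(last + 1 = x) from fun e => h e.symm]]
        rw [ih x x ([lo, last + 1] :: acc)]
        simp [pvTakeRun, h, pvSpans]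

theorem pv_main (l : List Int) : (l.foldl pvStepA []).reverse = pvSpans l := by
  cases l with
  | nil => simp [pvSpans]
  | cons x xs =>
      rw [List.foldl_cons, show pvStepA [] x = [[x, x + 1]] from rfl]
      rw [show ([[x, x + 1]] : List (List Int)) = [x, x + 1] :: [] from rfl]
      rw [pv_fold_run xs x x []]
      simp [pvSpans]

-- ===== VERDICT (by name: the statement is the Claim_ definition above) =====
theorem cept_to_spans_spec : Claim_equal_cept_to_spans := by
  intro cept _
  unfold Spec_cept_to_spans cept_to_spans cept_to_spans_alt
  rw [pv_main, pv_staged_eq_spans (PySem.List.sorted cept (fun x => x) false).length _ le_rfl]
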